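-- pv_equiv track=rewrite | github.com/anowa-eng/stenogram-10 | src/aligner.py | _split_by_spaces
-- ===== SOURCE A (Python) =====
-- def _split_by_spaces(g2p_output: list) -> 'Aligner.Layer':
--     '''
--     Takes in output from the g2p_en model and splits it by spaces, organizing the words into lists.
--
--     Args:
--         g2p_output: The output from the g2p_en model.
--
--     Returns:
--         Aligner.Layer: A list of lists, where each list contains the phonemes for a word.
--     '''
--     out = [[]]
--     for phone in g2p_output:
--         if phone == ' ':
--             out.append([])
--         else:
--             out[-1].append(phone)
--     return out
-- ===== SOURCE B (Python) =====
-- def _split_by_spaces(g2p_output: list) -> 'Aligner.Layer':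
--     '''Recursive slice-based re-implementation: cut off the word before the
--     first space and recurse on the remainder.'''
--     if ' ' not in g2p_output:
--         return [g2p_output[:]]
--     j = g2p_output.index(' ')
--     return [g2p_output[:j]] + _split_by_spaces(g2p_output[j + 1:])
-- ===== Notes on version B (the rewrite author's own statement) =====
-- stated objective: alternative
-- what changed: Replaced the element-by-element accumulate-into-last-list fold with a recursive slicer that finds the next space with list.index and emits the word slice before it, recursing on the remainder.
import Mathlib
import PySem

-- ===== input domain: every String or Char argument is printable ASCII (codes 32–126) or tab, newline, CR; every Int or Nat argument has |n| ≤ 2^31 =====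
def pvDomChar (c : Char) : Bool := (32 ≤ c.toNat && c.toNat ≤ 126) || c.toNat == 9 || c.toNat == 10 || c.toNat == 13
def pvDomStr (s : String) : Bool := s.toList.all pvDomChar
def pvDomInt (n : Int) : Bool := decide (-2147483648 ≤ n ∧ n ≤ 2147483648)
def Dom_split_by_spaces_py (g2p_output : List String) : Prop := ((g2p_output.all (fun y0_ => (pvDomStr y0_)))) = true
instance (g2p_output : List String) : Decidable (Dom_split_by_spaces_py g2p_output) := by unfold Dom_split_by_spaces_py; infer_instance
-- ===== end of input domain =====

-- B re-implements the accumulate-and-flush fold as a recursive slicer (find the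
-- next space, emit the word before it, recurse on the rest); same cost, proven equal.

-- ===== PORT A =====
-- out[-1].append(phone) on the never-empty out is ported as
-- out.dropLast ++ [out.getLastD [] ++ [phone]] (exact: out is always nonempty).
def split_by_spaces_py (g2p_output : List String) : List (List String) :=
  g2p_output.foldl
    (fun out phone =>
      if phone == " " then out ++ [[]]
      else out.dropLast ++ [out.getLastD [] ++ [phone]])
    [[]]

-- ===== PORT B =====
-- termination helper for the recursion: list.index returns an in-range index
theorem pv_index?_lt_length {α : Type} [BEq α] [LawfulBEq α] {xs : List α} {v : α} {j : Nat}
    (h : PySem.List.index? xs v = some j) : j < xs.length := by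
  rw [PySem.List.index?_eq_some_iff] at h
  obtain ⟨pre, suf, hx, hl, _⟩ := h
  subst hx; subst hl
  simp

def split_by_spaces_py_alt (g2p_output : List String) : List (List String) :=
  match h : PySem.List.index? g2p_output " " with
  | none => [g2p_output]
  | some j => g2p_output.take j :: split_by_spaces_py_alt (g2p_output.drop (j + 1))
termination_by g2p_output.length
decreasing_by
  have := pv_index?_lt_length h
  simp only [List.length_drop]
  omega

-- ===== PRECONDITION & SPEC =====
def Spec_split_by_spaces_py (g2p_output : List String) (out : List (List String)) : Prop := out = split_by_spaces_py_alt g2p_output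
instance (g2p_output : List String) (out : List (List String)) : Decidable (Spec_split_by_spaces_py g2p_output out) := by unfold Spec_split_by_spaces_py; infer_instance

-- ===== CLAIM (what is proved, stated in full; the proofs are below) =====
def Claim_equal_split_by_spaces_py : Prop := ∀ (g2p_output : List String), Dom_split_by_spaces_py g2p_output → Spec_split_by_spaces_py g2p_output (split_by_spaces_py g2p_output)

-- ===== LEMMAS AND PROOFS =====

-- reference splitter: structural recursion, cons-based
def pvS : List String → List (List String)
  | [] => [[]]
  | x :: xs =>
    if x = " " then [] :: pvS xs
    else
      match pvS xs with
      | [] => [[x]]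
      | h :: t => (x :: h) :: t

theorem pvS_cons (xs : List String) : ∃ h0 t, pvS xs = h0 :: t := by
  cases xs with
  | nil => exact ⟨[], [], rfl⟩
  | cons x xs =>
    simp only [pvS]
    split
    · exact ⟨_, _, rfl⟩
    · rcases h : pvS xs with _ | ⟨h0, t⟩ <;> exact ⟨_, _, rfl⟩

-- unconditional equations for B's port
theorem pvB_none {xs : List String} (h : PySem.List.index? xs " " = none) :
    split_by_spaces_py_alt xs = [xs] := by
  rw [split_by_spaces_py_alt]
  split
  · rfl
  · rename_i j heq; rw [h] at heq; cases heq

theorem pvB_some {xs : List String} {j : Nat} (h : PySem.List.index? xs " " = some j) :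
    split_by_spaces_py_alt xs = xs.take j :: split_by_spaces_py_alt (xs.drop (j + 1)) := by
  rw [split_by_spaces_py_alt]
  split
  · rename_i heq; rw [h] at heq; cases heq
  · rename_i j' heq; rw [h] at heq; injection heq with hj; subst hj; rfl

-- A's fold invariant: running it from init ++ [last] prepends last to the first
-- word of pvS and leaves init untouched.
theorem pvA_inv (xs : List String) (init : List (List String)) (last : List String) :
    xs.foldl
      (fun out phone =>
        if phone == " " then out ++ [[]]
        else out.dropLast ++ [out.getLastD [] ++ [phone]])
      (init ++ [last])
    = init ++ (last ++ (pvS xs).headI) :: (pvS xs).tail := by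
  induction xs generalizing init last with
  | nil => simp [pvS]
  | cons x xs ih =>
    simp only [List.foldl_cons]
    obtain ⟨h0, t, hS⟩ := pvS_cons xs
    by_cases hx : x = " "
    · subst hx
      simp only [beq_self_eq_true, if_true]
      rw [ih (init ++ [last]) []]
      simp [pvS, hS]
    · have hbeq : (x == " ") = false := by simp [hx]
      simp only [hbeq, Bool.false_eq_true, if_false]
      rw [List.dropLast_concat, List.getLastD_concat]
      rw [ih init (last ++ [x])]
      simp [pvS, hx, hS]

theorem pvA_eq_pvS (xs : List String) : split_by_spaces_py xs = pvS xs := by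
  have h := pvA_inv xs [] []
  simp only [List.nil_append] at h
  unfold split_by_spaces_py
  rw [h]
  obtain ⟨h0, t, hS⟩ := pvS_cons xs
  simp [hS]

theorem pvB_eq_pvS (xs : List String) : split_by_spaces_py_alt xs = pvS xs := by
  induction xs with
  | nil =>
    rw [pvB_none (by rw [PySem.List.index?_eq_none_iff]; simp)]
    rfl
  | cons x xs ih =>
    by_cases hx : x = " "
    · subst hx
      rw [pvB_some (PySem.List.index?_cons_self " " xs)]
      simp only [List.take_zero, List.drop_succ_cons, List.drop_zero, ih]
      simp [pvS]
    · obtain ⟨h0, t, hS⟩ := pvS_cons xs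
      cases hI : PySem.List.index? xs " " with
      | none =>
        have hc : PySem.List.index? (x :: xs) " " = none := by
          rw [PySem.List.index?_cons_of_ne xs hx, hI]; rfl
        rw [pvB_none hc]
        rw [pvB_none hI] at ih
        rw [hS] at ih
        injection ih with ih1 ih2
        subst ih2
        simp [pvS, hx, hS, ← ih1]
      | some j =>
        have hc : PySem.List.index? (x :: xs) " " = some (j + 1) := by
          rw [PySem.List.index?_cons_of_ne xs hx, hI]; rfl
        rw [pvB_some hc]
        rw [pvB_some hI] at ih
        simp only [List.take_succ_cons, List.drop_succ_cons]
        simp only [pvS, if_neg hx, hS]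
        rw [hS] at ih
        injection ih with ih1 ih2
        rw [ih1, ih2]

-- ===== VERDICT (by name: the statement is the Claim_ definition above) =====
theorem split_by_spaces_py_spec : Claim_equal_split_by_spaces_py := by
  intro xs _
  unfold Spec_split_by_spaces_py
  rw [pvA_eq_pvS, pvB_eq_pvS]
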